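-- pv_equiv track=rewrite | github.com/messamat/GHM_downscaling | preprocessing/helper.py | get_continental_extent
-- ===== SOURCE A (Python) =====
-- def get_continental_extent(continentlist):
--     extentdict = {
--         'af': (-19, 55, -35, 38),
--         'ar': (-180, -60, 51, 84),
--         'as': (57, 152, 0, 57),
--         'au': (94, 180, -56, 25),
--         'eu': (-25, 70, 12, 84),
--         'na': (-138, -52, 5, 63),
--         'sa': (-93, -32, -56, 15),
--         'si': (58, 180, 45, 84)
--     }
--     xmin, xmax, ymin, ymax = extentdict[continentlist[0]]
--     if len(continentlist) > 1:
--         for x in continentlist[1:]: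
--             tmpxmin, tmpxmax, tmpymin, tmpymax = extentdict[x]
--             xmin = min(xmin, tmpxmin)
--             xmax = max(xmax, tmpxmax)
--             ymin = min(tmpymin, ymin)
--             ymax = max(tmpymax, ymax)
--     return xmin, xmax, ymin, ymax
-- ===== SOURCE B (Python) =====
-- def get_continental_extent(continentlist):
--     extentdict = {
--         'af': (-19, 55, -35, 38),
--         'ar': (-180, -60, 51, 84),
--         'as': (57, 152, 0, 57),
--         'au': (94, 180, -56, 25),
--         'eu': (-25, 70, 12, 84),
--         'na': (-138, -52, 5, 63),
--         'sa': (-93, -32, -56, 15),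
--         'si': (58, 180, 45, 84)
--     }
--     extents = [extentdict[c] for c in continentlist]
--     xmins, xmaxs, ymins, ymaxs = zip(*extents)
--     return min(xmins), max(xmaxs), min(ymins), max(ymaxs)
-- ===== Notes on version B (the rewrite author's own statement) =====
-- stated objective: simpler
-- what changed: B collects all extent tuples, transposes them with zip(*...), and computes each of the four results as an independent min/max reduction, instead of threading four accumulators through an explicit loop over continentlist[1:].
import Mathlib
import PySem

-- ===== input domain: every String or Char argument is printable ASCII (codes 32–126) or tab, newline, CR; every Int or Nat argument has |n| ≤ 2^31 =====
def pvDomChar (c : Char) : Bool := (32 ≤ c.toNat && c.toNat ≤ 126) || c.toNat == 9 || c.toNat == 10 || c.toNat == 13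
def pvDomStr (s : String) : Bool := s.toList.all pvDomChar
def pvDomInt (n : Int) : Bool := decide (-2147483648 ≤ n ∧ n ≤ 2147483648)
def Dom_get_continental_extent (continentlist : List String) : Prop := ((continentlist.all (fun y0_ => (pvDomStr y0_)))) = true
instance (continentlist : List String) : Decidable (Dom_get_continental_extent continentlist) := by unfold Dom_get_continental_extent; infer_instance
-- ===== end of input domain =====

-- B computes the bounding box by transposing the extent tuples and taking four
-- independent min/max reductions, instead of A's single loop with four accumulators
-- (objective: simpler decomposition; same cost).


-- shared helper: the literal dict both Pythons build
def pvExtentdict : PySem.Dict String (Int × Int × Int × Int) :=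
  PySem.Dict.ofList
    [("af", (-19, 55, -35, 38)),
     ("ar", (-180, -60, 51, 84)),
     ("as", (57, 152, 0, 57)),
     ("au", (94, 180, -56, 25)),
     ("eu", (-25, 70, 12, 84)),
     ("na", (-138, -52, 5, 63)),
     ("sa", (-93, -32, -56, 15)),
     ("si", (58, 180, 45, 84))]

-- ===== PORT A =====
-- the body of A's for-loop (dict lookup + the four accumulator updates)
def pvStepA (s : Int × Int × Int × Int) (x : String) : Int × Int × Int × Int :=
  match pvExtentdict.get? x with
  | none => s  -- KeyError in Python; unreachable under Pre_
  | some (a, b, c, d) => (min s.1 a, max s.2.1 b, min c s.2.2.1, max d s.2.2.2)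

def get_continental_extent (continentlist : List String) : Int × Int × Int × Int :=
  match PySem.List.pyGet? continentlist 0 with
  | none => (0, 0, 0, 0)  -- IndexError in Python; excluded by Pre_
  | some c0 =>
    match pvExtentdict.get? c0 with
    | none => (0, 0, 0, 0)  -- KeyError in Python; excluded by Pre_
    | some e0 =>
      if continentlist.length > 1 then
        (PySem.List.slice continentlist (some 1) none).foldl pvStepA e0
      else e0

-- ===== PORT B =====
def pvF (c : String) : Int × Int × Int × Int := (pvExtentdict.get? c).getD (0, 0, 0, 0)

def get_continental_extent_alt (continentlist : List String) : Int × Int × Int × Int :=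
  let extents := continentlist.map pvF
  let xmins := extents.map (·.1)
  let xmaxs := extents.map (·.2.1)
  let ymins := extents.map (·.2.2.1)
  let ymaxs := extents.map (·.2.2.2)
  ((PySem.List.min? xmins (fun y => y)).getD 0,
   (PySem.List.max? xmaxs (fun y => y)).getD 0,
   (PySem.List.min? ymins (fun y => y)).getD 0,
   (PySem.List.max? ymaxs (fun y => y)).getD 0)

-- ===== PRECONDITION & SPEC =====
-- Pre_ excludes exactly the inputs on which Python A raises: the empty list
-- (IndexError) and lists containing a code not in the dict (KeyError).
def Pre_get_continental_extent (continentlist : List String) : Prop :=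
  continentlist ≠ [] ∧ ∀ c ∈ continentlist, (pvExtentdict.get? c).isSome = true
instance (continentlist : List String) : Decidable (Pre_get_continental_extent continentlist) := by unfold Pre_get_continental_extent; infer_instance

def pvWitness_get_continental_extent : List String := ["eu", "as"]

def Spec_get_continental_extent (continentlist : List String) (out : Int × Int × Int × Int) : Prop := out = get_continental_extent_alt continentlist
instance (continentlist : List String) (out : Int × Int × Int × Int) : Decidable (Spec_get_continental_extent continentlist out) := by unfold Spec_get_continental_extent; infer_instance

-- ===== CLAIM (what is proved, stated in full; the proofs are below) =====
def Claim_equal_get_continental_extent : Prop := ∀ (continentlist : List String), Dom_get_continental_extent continentlist → Pre_get_continental_extent continentlist → Spec_get_continental_extent continentlist (get_continental_extent continentlist)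

-- ===== LEMMAS AND PROOFS =====

-- A's four-accumulator fold splits into four independent componentwise folds.
lemma pv_fold_split (t : List String) (e : Int × Int × Int × Int)
    (hc : ∀ c ∈ t, (pvExtentdict.get? c).isSome = true) :
    t.foldl pvStepA e =
      ((t.map (fun c => (pvF c).1)).foldl min e.1,
       (t.map (fun c => (pvF c).2.1)).foldl max e.2.1,
       (t.map (fun c => (pvF c).2.2.1)).foldl min e.2.2.1,
       (t.map (fun c => (pvF c).2.2.2)).foldl max e.2.2.2) := by
  induction t generalizing e with
  | nil => simp
  | cons x t ih =>
    have hx : (pvExtentdict.get? x).isSome = true := hc x (by simp)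
    obtain ⟨v, hv⟩ := Option.isSome_iff_exists.mp hx
    have hstep : pvStepA e x =
        (min e.1 (pvF x).1, max e.2.1 (pvF x).2.1,
         min (pvF x).2.2.1 e.2.2.1, max (pvF x).2.2.2 e.2.2.2) := by
      obtain ⟨a, b, c, d⟩ := v
      simp [pvStepA, pvF, hv]
    simp only [List.foldl_cons, List.map_cons]
    rw [hstep, ih _ (fun c hcmem => hc c (by simp [hcmem]))]
    rw [min_comm (pvF x).2.2.1 e.2.2.1, max_comm (pvF x).2.2.2 e.2.2.2]

-- ===== VERDICT (by name: the statement is the Claim_ definition above) =====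
theorem get_continental_extent_spec : Claim_equal_get_continental_extent := by
  intro l _ hpre
  obtain ⟨hne, hall⟩ := hpre
  obtain ⟨h, t, rfl⟩ := List.exists_cons_of_ne_nil hne
  have hh : (pvExtentdict.get? h).isSome = true := hall h (by simp)
  obtain ⟨v, hv⟩ := Option.isSome_iff_exists.mp hh
  have hvf : pvF h = v := by simp [pvF, hv]
  have ht : ∀ c ∈ t, (pvExtentdict.get? c).isSome = true :=
    fun c hcmem => hall c (by simp [hcmem])
  show get_continental_extent (h :: t) = get_continental_extent_alt (h :: t)
  have hA : get_continental_extent (h :: t) = t.foldl pvStepA v := by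
    unfold get_continental_extent
    rw [PySem.List.pyGet?_zero_cons]
    simp only [hv]
    rcases t with _ | ⟨y, t'⟩
    · simp
    · simp [PySem.List.slice_from_one]
  rw [hA, pv_fold_split t v ht]
  unfold get_continental_extent_alt
  simp only [List.map_cons, List.map_map, Function.comp_def,
    PySem.List.min?_id_cons, PySem.List.max?_id_cons, Option.getD_some, hvf]
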